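-- pv_equiv track=rewrite | github.com/oarepo/oarepo-model-builder | oarepo_model_builder/datatypes/containers.py | _get_class_name
-- ===== SOURCE A (Python) =====
-- def _get_class_name(package_name: str, class_name: str):
--     if "." not in class_name:
--         return f"{package_name}.{class_name}"
--     if class_name.startswith("."):
--         package_path = package_name.split(".")
--         while class_name.startswith("."):
--             if package_path:
--                 package_path = package_path[:-1]
--             class_name = class_name[1:]
--         if package_path:
--             class_name = f"{'.'.join(package_path)}.{class_name}"
--     return class_name
-- ===== SOURCE B (Python) =====
-- def _get_class_name(package_name: str, class_name: str):
--     if "." not in class_name: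
--         return f"{package_name}.{class_name}"
--     if not class_name.startswith("."):
--         return class_name
--     return _ascend(package_name, False, class_name)
--
--
-- def _ascend(pkg, exhausted, rest):
--     # Recursively consume one leading dot at a time, moving to the parent
--     # package with rpartition; `exhausted` records that we already ran past
--     # the package root (one more component removed than existed).
--     if not rest.startswith("."):
--         if exhausted:
--             return rest
--         return f"{pkg}.{rest}"
--     head, sep, _ = pkg.rpartition(".")
--     return _ascend(head, exhausted or not sep, rest[1:])
-- ===== Notes on version B (the rewrite author's own statement) =====
-- stated objective: alternative
-- what changed: Instead of splitting the package into a list, looping to pop one component per dot, and joining back, B never builds a list: it recurses on the class name one leading dot at a time, ascending to the parent package with str.rpartition and tracking with a boolean whether it ran past the package root.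
import Mathlib
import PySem

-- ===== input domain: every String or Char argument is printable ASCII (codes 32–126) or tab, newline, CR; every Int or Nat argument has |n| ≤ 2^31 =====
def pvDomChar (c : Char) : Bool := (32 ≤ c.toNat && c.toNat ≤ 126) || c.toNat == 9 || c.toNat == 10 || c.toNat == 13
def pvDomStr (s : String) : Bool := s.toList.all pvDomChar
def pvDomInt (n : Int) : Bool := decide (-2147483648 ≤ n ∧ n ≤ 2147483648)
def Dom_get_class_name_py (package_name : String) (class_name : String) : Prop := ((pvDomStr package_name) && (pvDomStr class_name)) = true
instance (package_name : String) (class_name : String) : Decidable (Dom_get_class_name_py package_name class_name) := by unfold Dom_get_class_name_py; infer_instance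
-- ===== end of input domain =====

-- B replaces A's split-into-list / pop-per-dot loop / join by a list-free recursion on the
-- class name that ascends to the parent package via rpartition; same return value, no side effects.

-- ===== PORT A =====
-- A's while loop: while class_name startswith ".": pop last package component (if any), drop the dot.
def pvAWhile (pp : List (List Char)) (cs : List Char) : List (List Char) × List Char :=
  match cs with
  | [] => (pp, [])
  | c :: rest =>
    if c == '.' then pvAWhile (if pp.isEmpty then pp else pp.dropLast) rest
    else (pp, c :: rest)

def get_class_name_py (package_name : String) (class_name : String) : String :=
  if !PySem.Str.isIn "." class_name then
    String.ofList (package_name.toList ++ '.' :: class_name.toList)   -- f"{package_name}.{class_name}"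
  else if PySem.Str.startswith class_name "." then
    let package_path := PySem.Chars.splitOn package_name.toList ['.']
    let r := pvAWhile package_path class_name.toList
    if !r.1.isEmpty then String.ofList (PySem.Chars.join ['.'] r.1 ++ '.' :: r.2)
    else String.ofList r.2
  else class_name

-- ===== PORT B =====
-- pkg.rpartition(".")[0] with the found-flag: scan the REVERSED string for the last dot;
-- exact for the single-character separator "." (some head-before-last-dot, none = no dot).
def pvRPartRev : List Char → Option (List Char)
  | [] => none
  | c :: rest => if c == '.' then some rest.reverse else pvRPartRev rest

-- _ascend(pkg, exhausted, rest) from Source B, recursing on rest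
def pvAscend : List Char → Bool → List Char → List Char
  | pkg, exh, [] => if exh then [] else pkg ++ ['.']           -- rest doesn't start with "."
  | pkg, exh, c :: rest =>
    if c == '.' then
      let r := pvRPartRev pkg.reverse
      pvAscend (r.getD []) (exh || r.isNone) rest
    else if exh then c :: rest else pkg ++ '.' :: c :: rest

def get_class_name_py_alt (package_name : String) (class_name : String) : String :=
  if !PySem.Str.isIn "." class_name then
    String.ofList (package_name.toList ++ '.' :: class_name.toList)
  else if !PySem.Str.startswith class_name "." then class_name
  else String.ofList (pvAscend package_name.toList false class_name.toList)

-- ===== PRECONDITION & SPEC =====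
def Spec_get_class_name_py (package_name : String) (class_name : String) (out : String) : Prop := out = get_class_name_py_alt package_name class_name
instance (package_name : String) (class_name : String) (out : String) : Decidable (Spec_get_class_name_py package_name class_name out) := by unfold Spec_get_class_name_py; infer_instance

-- ===== CLAIM (what is proved, stated in full; the proofs are below) =====
def Claim_equal_get_class_name_py : Prop := ∀ (package_name : String) (class_name : String), Dom_get_class_name_py package_name class_name → Spec_get_class_name_py package_name class_name (get_class_name_py package_name class_name)

-- ===== LEMMAS AND PROOFS =====

-- reference shape of splitOn on separator "."
def pvMySplit : List Char → List Char → List (List Char)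
  | [], cur => [cur.reverse]
  | c :: rest, cur => if c = '.' then cur.reverse :: pvMySplit rest [] else pvMySplit rest (c :: cur)

lemma pv_go_eq (fuel : Nat) (l cur : List Char) (acc : List (List Char)) (h : l.length ≤ fuel) :
    PySem.Chars.splitOn.go ['.'] fuel l cur acc = acc.reverse ++ pvMySplit l cur := by
  induction fuel generalizing l cur acc with
  | zero =>
    cases l with
    | nil => simp [PySem.Chars.splitOn.go, pvMySplit]
    | cons c rest => simp at h
  | succ fuel ih =>
    cases l with
    | nil => simp [PySem.Chars.splitOn.go, pvMySplit]
    | cons c rest =>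
      have hlen : rest.length ≤ fuel := by simp at h; omega
      by_cases hc : c = '.'
      · subst hc
        rw [show PySem.Chars.splitOn.go ['.'] (fuel + 1) ('.' :: rest) cur acc
            = PySem.Chars.splitOn.go ['.'] fuel rest [] (cur.reverse :: acc) from by
          simp [PySem.Chars.splitOn.go, List.isPrefixOf]]
        rw [ih rest [] (cur.reverse :: acc) hlen]
        simp [pvMySplit]
      · rw [show PySem.Chars.splitOn.go ['.'] (fuel + 1) (c :: rest) cur acc
            = PySem.Chars.splitOn.go ['.'] fuel rest (c :: cur) acc from by
          simp [PySem.Chars.splitOn.go, List.isPrefixOf, Ne.symm hc]]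
        rw [ih rest (c :: cur) acc hlen]
        simp [pvMySplit, hc]

lemma pvMySplit_ne_nil (l cur : List Char) : pvMySplit l cur ≠ [] := by
  induction l generalizing cur with
  | nil => simp [pvMySplit]
  | cons c rest ih =>
    by_cases hc : c = '.' <;> simp [pvMySplit, hc, ih]

lemma pvMySplit_dotfree (l cur : List Char) (hcur : '.' ∉ cur) :
    ∀ x ∈ pvMySplit l cur, '.' ∉ x := by
  induction l generalizing cur with
  | nil => intro x hx; simp [pvMySplit] at hx; subst hx; simp [hcur]
  | cons c rest ih =>
    intro x hx
    by_cases hc : c = '.'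
    · subst hc; simp [pvMySplit] at hx
      rcases hx with h | h
      · subst h; simp [hcur]
      · exact ih [] (by simp) x h
    · simp [pvMySplit, hc] at hx
      exact ih (c :: cur) (by simp [hcur]; exact fun he => hc he.symm) x hx

lemma pv_join_cons (a : List Char) (parts : List (List Char)) (h : parts ≠ []) :
    PySem.Chars.join ['.'] (a :: parts) = a ++ '.' :: PySem.Chars.join ['.'] parts := by
  cases parts with
  | nil => exact absurd rfl h
  | cons b t => rw [PySem.Chars.join_cons_cons]; simp

lemma pv_join_concat (L : List (List Char)) (q : List Char) (h : L ≠ []) :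
    PySem.Chars.join ['.'] (L ++ [q]) = PySem.Chars.join ['.'] L ++ '.' :: q := by
  induction L with
  | nil => exact absurd rfl h
  | cons a t ih =>
    cases t with
    | nil => rw [List.cons_append, List.nil_append, PySem.Chars.join_cons_cons,
        PySem.Chars.join_singleton, PySem.Chars.join_singleton]; simp
    | cons b t' =>
      rw [List.cons_append, pv_join_cons a _ (by simp), ih (by simp),
        pv_join_cons a (b :: t') (by simp)]
      simp

lemma pvMySplit_join (l cur : List Char) :
    PySem.Chars.join ['.'] (pvMySplit l cur) = cur.reverse ++ l := by
  induction l generalizing cur with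
  | nil => simp [pvMySplit, PySem.Chars.join_singleton]
  | cons c rest ih =>
    by_cases hc : c = '.'
    · subst hc
      rw [show pvMySplit ('.' :: rest) cur = cur.reverse :: pvMySplit rest [] from by
        simp [pvMySplit]]
      rw [pv_join_cons _ _ (pvMySplit_ne_nil rest []), ih []]
      simp
    · rw [show pvMySplit (c :: rest) cur = pvMySplit rest (c :: cur) from by
        simp [pvMySplit, hc]]
      rw [ih (c :: cur)]; simp

lemma pv_splitOn_eq (s : List Char) : PySem.Chars.splitOn s ['.'] = pvMySplit s [] := by
  unfold PySem.Chars.splitOn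
  rw [pv_go_eq s.length.succ s [] [] (by omega)]
  simp

lemma pvRPartRev_none (ys : List Char) (h : '.' ∉ ys) : pvRPartRev ys = none := by
  induction ys with
  | nil => rfl
  | cons c rest ih =>
    have hc : ¬ (c = '.') := fun he => h (he ▸ List.mem_cons_self)
    simp only [pvRPartRev, beq_iff_eq, hc, if_false]
    exact ih (fun hm => h (List.mem_cons_of_mem _ hm))

lemma pvRPartRev_found (ys zs : List Char) (h : '.' ∉ ys) :
    pvRPartRev (ys ++ '.' :: zs) = some zs.reverse := by
  induction ys with
  | nil => simp [pvRPartRev]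
  | cons c rest ih =>
    have hc : ¬ (c = '.') := fun he => h (he ▸ List.mem_cons_self)
    simp only [List.cons_append, pvRPartRev, beq_iff_eq, hc, if_false]
    exact ih (fun hm => h (List.mem_cons_of_mem _ hm))

lemma pv_take_dropLast {α : Type} (xs : List α) (k : Nat) :
    xs.dropLast.take (xs.dropLast.length - k) = xs.take (xs.length - (k + 1)) := by
  rw [List.dropLast_eq_take, List.take_take, List.length_take]
  exact congrFun (congrArg List.take (by omega)) xs

lemma pvAWhile_eq (pp : List (List Char)) (cs : List Char) :
    pvAWhile pp cs = (pp.take (pp.length - (cs.takeWhile (· == '.')).length), cs.dropWhile (· == '.')) := by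
  induction cs generalizing pp with
  | nil => simp [pvAWhile]
  | cons c rest ih =>
    by_cases hc : c == '.'
    · simp only [pvAWhile, hc, if_true, List.takeWhile_cons, List.dropWhile_cons, ih]
      cases pp with
      | nil => simp
      | cons p ps =>
        simp only [List.isEmpty_cons, Bool.false_eq_true, if_false]
        rw [pv_take_dropLast]
        simp
    · simp [pvAWhile, hc]

lemma pvAscend_exhausted (cs : List Char) :
    pvAscend [] true cs = cs.dropWhile (· == '.') := by
  induction cs with
  | nil => simp [pvAscend]
  | cons c rest ih =>
    by_cases hc : c == '.'
    · simp [pvAscend, hc, pvRPartRev, ih]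
    · simp [pvAscend, hc]

lemma pvAscend_eq (cs : List Char) (pp : List (List Char)) (hne : pp ≠ [])
    (hdf : ∀ x ∈ pp, '.' ∉ x) :
    pvAscend (PySem.Chars.join ['.'] pp) false cs =
      (if (pp.take (pp.length - (cs.takeWhile (· == '.')).length)).isEmpty then
        cs.dropWhile (· == '.')
      else PySem.Chars.join ['.'] (pp.take (pp.length - (cs.takeWhile (· == '.')).length))
        ++ '.' :: cs.dropWhile (· == '.')) := by
  induction cs generalizing pp with
  | nil =>
    simp [pvAscend, List.isEmpty_iff, hne]
  | cons c rest ih =>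
    by_cases hc : c == '.'
    · rcases List.eq_nil_or_concat pp with h | ⟨L, q, h⟩
      · exact absurd h hne
      subst h
      have hq : '.' ∉ q := by
        have := hdf q (by simp [List.concat_eq_append]); exact this
      cases L with
      | nil =>
        have hrp : pvRPartRev (PySem.Chars.join ['.'] ([].concat q)).reverse = none := by
          simp only [List.concat_eq_append, List.nil_append, PySem.Chars.join_singleton]
          exact pvRPartRev_none _ (by simp [hq])
        simp only [pvAscend, hc, if_true, hrp, Option.getD_none, Option.isNone_none,
          Bool.or_true, pvAscend_exhausted]
        simp [hc]
      | cons a t =>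
        have hL : PySem.Chars.join ['.'] ((a :: t).concat q)
            = PySem.Chars.join ['.'] (a :: t) ++ '.' :: q := by
          rw [List.concat_eq_append]; exact pv_join_concat _ _ (by simp)
        have hrp : pvRPartRev (PySem.Chars.join ['.'] ((a :: t).concat q)).reverse
            = some (PySem.Chars.join ['.'] (a :: t)) := by
          rw [hL]
          have : (PySem.Chars.join ['.'] (a :: t) ++ '.' :: q).reverse
              = q.reverse ++ '.' :: (PySem.Chars.join ['.'] (a :: t)).reverse := by simp
          rw [this, pvRPartRev_found _ _ (by simp [hq])]
          simp
        simp only [pvAscend, hc, if_true, hrp, Option.getD_some, Option.isNone_some,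
          Bool.or_false]
        rw [ih (a :: t) (by simp) (fun x hx => hdf x (by rw [List.concat_eq_append]; exact List.mem_append_left _ hx))]
        have htake : (a :: t).take ((a :: t).length - (rest.takeWhile (· == '.')).length)
            = ((a :: t).concat q).take (((a :: t).concat q).length - ((('.' : Char) :: rest).takeWhile (· == '.')).length) := by
          have h1 := pv_take_dropLast ((a :: t) ++ [q]) (rest.takeWhile (· == '.')).length
          rw [List.dropLast_concat] at h1
          have hk : ((('.' : Char) :: rest).takeWhile (· == '.')).length
              = (rest.takeWhile (· == '.')).length + 1 := by simp
          rw [List.concat_eq_append, hk]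
          exact h1
        rw [htake]
        simp [hc]
    · have h0 : (((c :: rest).takeWhile (· == '.'))).length = 0 := by
        simp [hc]
      rw [h0]
      simp only [Nat.sub_zero, List.take_length]
      have : pp.isEmpty = false := by simp [hne]
      simp [pvAscend, hc, this]

-- ===== VERDICT (by name: the statement is the Claim_ definition above) =====
theorem get_class_name_py_spec : Claim_equal_get_class_name_py := by
  intro pn cn _
  unfold Spec_get_class_name_py get_class_name_py get_class_name_py_alt
  by_cases h1 : PySem.Chars.isIn ['.'] cn.toList
  · by_cases h2 : PySem.Chars.startswith cn.toList ['.']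
    · simp only [PySem.Str.isIn, PySem.Str.startswith]
      have hsp := pv_splitOn_eq pn.toList
      have hne : PySem.Chars.splitOn pn.toList ['.'] ≠ [] := by
        rw [hsp]; exact pvMySplit_ne_nil _ _
      have hdf : ∀ x ∈ PySem.Chars.splitOn pn.toList ['.'], '.' ∉ x := by
        rw [hsp]; exact pvMySplit_dotfree _ _ (by simp)
      have hjoin : PySem.Chars.join ['.'] (PySem.Chars.splitOn pn.toList ['.']) = pn.toList := by
        rw [hsp, pvMySplit_join]; simp
      have key := pvAscend_eq cn.toList _ hne hdf
      rw [hjoin] at key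
      rw [pvAWhile_eq, key]
      by_cases hE : (List.take ((PySem.Chars.splitOn pn.toList ['.']).length
          - (cn.toList.takeWhile (· == '.')).length) (PySem.Chars.splitOn pn.toList ['.'])).isEmpty
      · simp [hE, h1, h2]
      · simp [hE, h1, h2]
    · simp [PySem.Str.isIn, h1, PySem.Str.startswith, h2]
  · simp [PySem.Str.isIn, h1]
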